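-- pv_equiv track=rewrite | github.com/Flashhhhhhzj/feishu-to-markdown-with-rustfs | scripts/feishu_docx_to_markdown.py | finalize_markdown
-- ===== SOURCE A (Python) =====
-- from typing import Any, Dict, Iterable, List, Optional, Sequence, Tuple
--
-- def finalize_markdown(lines: Iterable[str]) -> str:
--     output: List[str] = []
--     previous_blank = False
--     for line in lines:
--         stripped = line.rstrip()
--         if not stripped:
--             if previous_blank:
--                 continue
--             previous_blank = True
--             output.append("")
--             continue
--         previous_blank = False
--         if output and output[-1] and stripped.startswith("#"):
--             output.append("")
--         if output and output[-1] and stripped.startswith("```"):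
--             output.append("")
--         if output and output[-1] and stripped.startswith("|") and not output[-1].startswith("|"):
--             output.append("")
--         output.append(stripped)
--     return "\n".join(output).strip() + "\n"
-- ===== SOURCE B (Python) =====
-- from typing import Iterable, List
--
-- def finalize_markdown(lines: Iterable[str]) -> str:
--     # Pass 1: rstrip every line and collapse runs of blank lines into one "".
--     cleaned: List[str] = []
--     prev_blank = False
--     for line in lines:
--         s = line.rstrip()
--         if not s:
--             if not prev_blank:
--                 cleaned.append("")
--             prev_blank = True
--         else:
--             cleaned.append(s)
--             prev_blank = False
--     # Pass 2: insert one blank separator before headings/code fences/table starts.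
--     out: List[str] = []
--     for s in cleaned:
--         if not s:
--             out.append("")
--         else:
--             if out and out[-1] and (
--                 s.startswith("#")
--                 or s.startswith("```")
--                 or (s.startswith("|") and not out[-1].startswith("|"))
--             ):
--                 out.append("")
--             out.append(s)
--     return "\n".join(out).strip() + "\n"
-- ===== Notes on version B (the rewrite author's own statement) =====
-- stated objective: alternative
-- what changed: Replaces A's single interleaved loop (blank flag plus three sequential separator checks mutating the output between them) by two passes: one pass that rstrips and collapses blank runs into a normalized list, then a pass over that list that inserts at most one blank separator per line using a single combined condition.
import Mathlib
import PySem

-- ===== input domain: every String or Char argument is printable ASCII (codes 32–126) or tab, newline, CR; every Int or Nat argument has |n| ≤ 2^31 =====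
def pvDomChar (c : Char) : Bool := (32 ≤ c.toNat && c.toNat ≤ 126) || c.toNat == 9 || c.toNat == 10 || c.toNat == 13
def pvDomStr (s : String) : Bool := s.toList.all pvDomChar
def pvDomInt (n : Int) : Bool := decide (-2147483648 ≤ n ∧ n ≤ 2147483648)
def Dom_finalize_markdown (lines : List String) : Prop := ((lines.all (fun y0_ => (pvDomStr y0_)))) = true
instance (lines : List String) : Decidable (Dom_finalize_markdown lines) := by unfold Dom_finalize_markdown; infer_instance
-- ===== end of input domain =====

-- B replaces A's single interleaved loop by two passes (collapse blanks, then insert separators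
-- with one combined condition); same cost, different decomposition.

-- ===== PORT A =====
-- one iteration of A's loop: state = (output, previous_blank)
def fmStepA (st : List String × Bool) (line : String) : List String × Bool :=
  let output := st.1
  let stripped := PySem.Str.rstrip line
  if stripped = "" then
    if st.2 then st else (output ++ [""], true)
  else
    let o1 := if output ≠ [] ∧ output.getLastD "" ≠ "" ∧ PySem.Str.startswith stripped "#" then output ++ [""] else output
    let o2 := if o1 ≠ [] ∧ o1.getLastD "" ≠ "" ∧ PySem.Str.startswith stripped "```" then o1 ++ [""] else o1
    let o3 := if o2 ≠ [] ∧ o2.getLastD "" ≠ "" ∧ PySem.Str.startswith stripped "|" ∧ ¬ PySem.Str.startswith (o2.getLastD "") "|" then o2 ++ [""] else o2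
    (o3 ++ [stripped], false)

def finalize_markdown (lines : List String) : String :=
  let st := lines.foldl fmStepA ([], false)
  PySem.Str.strip (PySem.Str.join "\n" st.1) ++ "\n"

-- ===== PORT B =====
-- pass 1 step: rstrip and collapse blank runs; state = (cleaned, prev_blank)
def fmStepC (st : List String × Bool) (line : String) : List String × Bool :=
  let s := PySem.Str.rstrip line
  if s = "" then
    (if st.2 then st.1 else st.1 ++ [""], true)
  else
    (st.1 ++ [s], false)

-- pass 2 step: insert at most one blank separator, one combined condition
def fmStepE (out : List String) (s : String) : List String :=
  if s = "" then out ++ [""]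
  else
    let out' := if out ≠ [] ∧ out.getLastD "" ≠ "" ∧
        (PySem.Str.startswith s "#" ∨ PySem.Str.startswith s "```" ∨
          (PySem.Str.startswith s "|" ∧ ¬ PySem.Str.startswith (out.getLastD "") "|")) then out ++ [""] else out
    out' ++ [s]

def finalize_markdown_alt (lines : List String) : String :=
  let cleaned := (lines.foldl fmStepC ([], false)).1
  let out := cleaned.foldl fmStepE []
  PySem.Str.strip (PySem.Str.join "\n" out) ++ "\n"

-- ===== PRECONDITION & SPEC =====
def Spec_finalize_markdown (lines : List String) (out : String) : Prop := out = finalize_markdown_alt lines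
instance (lines : List String) (out : String) : Decidable (Spec_finalize_markdown lines out) := by unfold Spec_finalize_markdown; infer_instance

-- ===== CLAIM (what is proved, stated in full; the proofs are below) =====
def Claim_equal_finalize_markdown : Prop := ∀ (lines : List String), Dom_finalize_markdown lines → Spec_finalize_markdown lines (finalize_markdown lines)

-- ===== LEMMAS AND PROOFS =====

-- recursive characterization of pass 1 (proof helper only)
def fmCollapse : Bool → List String → List String
  | _, [] => []
  | pb, l :: ls =>
    let s := PySem.Str.rstrip l
    if s = "" then (if pb then fmCollapse true ls else "" :: fmCollapse true ls)
    else s :: fmCollapse false ls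

lemma fmCollapse_fold (ls : List String) : ∀ (acc : List String) (pb : Bool),
    (ls.foldl fmStepC (acc, pb)).1 = acc ++ fmCollapse pb ls := by
  induction ls with
  | nil => intro acc pb; simp [fmCollapse]
  | cons l ls ih =>
    intro acc pb
    simp only [List.foldl_cons, fmStepC, fmCollapse]
    split_ifs with h1 h2 <;> simp [ih]

-- A's non-blank branch equals B's emit step on a non-empty stripped line
lemma fmStep_nonblank (out : List String) (s : String) (hs : s ≠ "") :
    (let o1 := if out ≠ [] ∧ out.getLastD "" ≠ "" ∧ PySem.Str.startswith s "#" then out ++ [""] else out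
     let o2 := if o1 ≠ [] ∧ o1.getLastD "" ≠ "" ∧ PySem.Str.startswith s "```" then o1 ++ [""] else o1
     let o3 := if o2 ≠ [] ∧ o2.getLastD "" ≠ "" ∧ PySem.Str.startswith s "|" ∧ ¬ PySem.Str.startswith (o2.getLastD "") "|" then o2 ++ [""] else o2
     o3 ++ [s]) = fmStepE out s := by
  by_cases hE : out = [] <;>
  by_cases hL : out.getLastD "" = "" <;>
  by_cases bH : PySem.Str.startswith s "#" = true <;>
  by_cases bT : PySem.Str.startswith s "```" = true <;>
  by_cases bP : PySem.Str.startswith s "|" = true <;>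
  by_cases bL : PySem.Str.startswith (out.getLastD "") "|" = true <;>
  simp_all [fmStepE]

-- main loop correspondence: A's fold = emit fold over the collapsed list
lemma fmMain (ls : List String) : ∀ (out : List String) (pb : Bool),
    (ls.foldl fmStepA (out, pb)).1 = (fmCollapse pb ls).foldl fmStepE out := by
  induction ls with
  | nil => intro out pb; simp [fmCollapse]
  | cons l ls ih =>
    intro out pb
    simp only [List.foldl_cons, fmCollapse]
    by_cases hb : PySem.Str.rstrip l = ""
    · cases pb with
      | true => simp [fmStepA, hb, ih]
      | false =>
        simp only [fmStepA, hb, if_true, if_neg (Bool.false_ne_true), ih]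
        simp [fmStepE]
    · have hstep : fmStepA (out, pb) l = (fmStepE out (PySem.Str.rstrip l), false) := by
        simp only [fmStepA, if_neg hb]
        exact congrArg (fun x => (x, false)) (fmStep_nonblank out (PySem.Str.rstrip l) hb)
      simp [hb, hstep, ih]

-- ===== VERDICT (by name: the statement is the Claim_ definition above) =====
theorem finalize_markdown_spec : Claim_equal_finalize_markdown := by
  intro lines _
  unfold Spec_finalize_markdown finalize_markdown finalize_markdown_alt
  simp only [fmMain, fmCollapse_fold, List.nil_append]
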